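-- pv_equiv track=rewrite | github.com/MaxWolf-01/TruthTabler | src/optimization.py | transposed_pi_table
-- ===== SOURCE A (Python) =====
-- def transposed_pi_table(pi_table):
--     """
--     switches keys and values of the regular prime implicant table
--       =>  prime implicants(keys) : minterms(values)
--     """
--     pis = set((pi for pis in list(pi_table.values()) for pi in pis))
--     pi_occurences = dict()
--     for pi in pis:
--         pi_occurences.setdefault(pi, set())
--         for minterm in pi_table:
--             if pi in pi_table[minterm]:
--                 pi_occurences[pi].add(minterm)
--     return pi_occurences
-- ===== SOURCE B (Python) =====
-- def transposed_pi_table(pi_table):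
--     """
--     switches keys and values of the regular prime implicant table
--       =>  prime implicants(keys) : minterms(values)
--     One pass over the table: each minterm is appended to the set of every
--     prime implicant covering it, so no per-implicant rescan of the table.
--     """
--     pi_occurences = dict()
--     for minterm, pis in pi_table.items():
--         for pi in pis:
--             if pi in pi_occurences:
--                 pi_occurences[pi].add(minterm)
--             else:
--                 pi_occurences[pi] = {minterm}
--     return pi_occurences
-- ===== Notes on version B (the rewrite author's own statement) =====
-- stated objective: faster
-- what changed: Instead of first collecting the set of all prime implicants and then rescanning the whole table once per prime implicant with a membership test, B makes a single pass over the table, adding each minterm to the sets of exactly the prime implicants that cover it.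
import Mathlib
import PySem

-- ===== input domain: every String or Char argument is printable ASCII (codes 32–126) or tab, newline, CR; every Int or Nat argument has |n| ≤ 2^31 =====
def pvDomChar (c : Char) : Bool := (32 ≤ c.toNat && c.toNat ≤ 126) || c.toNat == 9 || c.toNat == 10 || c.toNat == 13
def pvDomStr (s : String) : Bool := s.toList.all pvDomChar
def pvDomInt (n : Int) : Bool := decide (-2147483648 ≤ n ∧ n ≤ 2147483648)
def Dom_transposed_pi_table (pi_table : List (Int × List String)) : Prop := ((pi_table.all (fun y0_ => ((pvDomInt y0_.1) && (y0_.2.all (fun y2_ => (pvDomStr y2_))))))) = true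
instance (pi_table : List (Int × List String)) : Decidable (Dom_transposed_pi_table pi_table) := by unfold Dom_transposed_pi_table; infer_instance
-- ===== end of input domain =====

-- B replaces A's rescan-the-whole-table-per-prime-implicant nesting by one pass over the
-- table that adds each minterm to the sets of the prime implicants covering it (objective: faster).
-- The returned dicts are compared as Python compares them (key order immaterial); the Lean
-- ports realise both in first-occurrence key order.

-- ===== PORT A =====
def transposed_pi_table (pi_table : List (Int × List String)) : List (String × List Int) :=
  let d : PySem.Dict Int (List String) := PySem.Dict.ofList pi_table
  -- pis = set(pi for pis in list(pi_table.values()) for pi in pis)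
  let pis : PySem.Set String := PySem.Set.ofList (d.values.flatMap (fun v => v))
  -- for pi in pis: setdefault, then scan every minterm and test membership
  let occ : PySem.Dict String (List Int) :=
    pis.foldl (fun occ pi =>
      let occ := occ.setdefault pi PySem.Set.empty
      d.keys.foldl (fun occ minterm =>
        if (d.getD minterm []).contains pi
        then occ.modify pi PySem.Set.empty (fun s => PySem.Set.add s minterm)
        else occ) occ)
      PySem.Dict.empty
  occ.items

-- ===== PORT B =====
-- inner loop body: 'if pi in pi_occurences: pi_occurences[pi].add(minterm) else: pi_occurences[pi] = {minterm}'
def tpBRow : Int → List String → PySem.Dict String (List Int) → PySem.Dict String (List Int)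
  | _, [], occ => occ
  | minterm, pi :: rest, occ =>
      tpBRow minterm rest
        (if occ.contains pi
         then occ.modify pi PySem.Set.empty (fun s => PySem.Set.add s minterm)
         else occ.insert pi (PySem.Set.add PySem.Set.empty minterm))

-- outer loop: 'for minterm, pis in pi_table.items(): …'
def tpBRows : List (Int × List String) → PySem.Dict String (List Int) → PySem.Dict String (List Int)
  | [], occ => occ
  | (minterm, ps) :: rest, occ => tpBRows rest (tpBRow minterm ps occ)

def transposed_pi_table_alt (pi_table : List (Int × List String)) : List (String × List Int) :=
  (tpBRows (PySem.Dict.ofList pi_table).items PySem.Dict.empty).items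

-- ===== PRECONDITION & SPEC =====
def Spec_transposed_pi_table (pi_table : List (Int × List String)) (out : List (String × List Int)) : Prop := out = transposed_pi_table_alt pi_table
instance (pi_table : List (Int × List String)) (out : List (String × List Int)) : Decidable (Spec_transposed_pi_table pi_table out) := by unfold Spec_transposed_pi_table; infer_instance

-- ===== CLAIM (what is proved, stated in full; the proofs are below) =====
def Claim_equal_transposed_pi_table : Prop := ∀ (pi_table : List (Int × List String)), Dom_transposed_pi_table pi_table → Spec_transposed_pi_table pi_table (transposed_pi_table pi_table)

-- ===== LEMMAS AND PROOFS =====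

-- B's branch collapses: both arms are d[pi] = (d.get(pi, set())).add(minterm).
lemma tpB_step (occ : PySem.Dict String (List Int)) (pi : String) (m : Int) :
    (if occ.contains pi
       then occ.modify pi PySem.Set.empty (fun s => PySem.Set.add s m)
       else occ.insert pi (PySem.Set.add PySem.Set.empty m))
      = occ.modify pi PySem.Set.empty (fun s => PySem.Set.add s m) := by
  by_cases h : occ.contains pi = true
  · simp [h]
  · have h' : occ.contains pi = false := by simpa using h
    simp only [h', Bool.false_eq_true, if_false, PySem.Dict.modify,
      PySem.Dict.getD_of_not_contains occ PySem.Set.empty h']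

lemma tpBRow_eq (m : Int) (ps : List String) (occ : PySem.Dict String (List Int)) :
    tpBRow m ps occ
      = ps.foldl (fun occ p => occ.modify p PySem.Set.empty (fun s => PySem.Set.add s m)) occ := by
  induction ps generalizing occ with
  | nil => rfl
  | cons p ps ih => simp only [tpBRow, tpB_step, List.foldl_cons, ih]

lemma tpBRows_eq (l : List (Int × List String)) (occ : PySem.Dict String (List Int)) :
    tpBRows l occ
      = l.foldl (fun occ mp =>
          mp.2.foldl (fun occ p => occ.modify p PySem.Set.empty (fun s => PySem.Set.add s mp.1)) occ) occ := by
  induction l generalizing occ with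
  | nil => rfl
  | cons mp l ih => cases mp; simp only [tpBRows, tpBRow_eq, List.foldl_cons, ih]

-- A's inner loop over the minterms, at a key pi already bound to s0, only grows pi's set.
lemma tpA_inner (ms : List Int) (c : Int → Bool) (occ0 : PySem.Dict String (List Int))
    (pi : String) (s0 : List Int) :
    ms.foldl (fun occ m => if c m then occ.modify pi PySem.Set.empty (fun s => PySem.Set.add s m) else occ)
        (occ0.insert pi s0)
      = occ0.insert pi ((ms.filter c).foldl PySem.Set.add s0) := by
  induction ms generalizing s0 with
  | nil => rfl
  | cons m ms ih =>
    by_cases h : c m = true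
    · simp only [List.foldl_cons, List.filter_cons, h, if_pos, PySem.Dict.modify,
        PySem.Dict.getD_insert_self, PySem.Dict.insert_insert_self]
      exact ih (PySem.Set.add s0 m)
    · simp only [List.foldl_cons, List.filter_cons, h, if_neg, Bool.false_eq_true,
        not_false_iff]
      exact ih s0

-- A's outer loop over the (duplicate-free) prime implicants appends one fresh entry per pi.
lemma tpA_outer (ms : List Int) (c : String → Int → Bool) (s : List String) (hs : s.Nodup)
    (occ : PySem.Dict String (List Int)) (hfree : ∀ pi ∈ s, occ.contains pi = false) :
    (s.foldl (fun occ pi =>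
        ms.foldl (fun occ m => if c pi m then occ.modify pi PySem.Set.empty (fun t => PySem.Set.add t m) else occ)
          (occ.setdefault pi PySem.Set.empty)) occ).items
      = occ.items ++ s.map (fun pi => (pi, (ms.filter (c pi)).foldl PySem.Set.add PySem.Set.empty)) := by
  induction s generalizing occ with
  | nil => simp
  | cons pi s ih =>
    have hpi : occ.contains pi = false := hfree pi (List.mem_cons_self ..)
    have hset : occ.setdefault pi PySem.Set.empty = occ.insert pi PySem.Set.empty :=
      PySem.Dict.setdefault_of_not_contains occ PySem.Set.empty hpi
    simp only [List.foldl_cons, hset, tpA_inner ms (c pi) occ pi PySem.Set.empty]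
    rw [ih (hs.of_cons)]
    · rw [PySem.Dict.items_insert_of_not_contains occ _ hpi]
      simp
    · intro pi' hpi'
      rw [PySem.Dict.contains_insert]
      have : pi' ≠ pi := by
        rintro rfl; exact (List.nodup_cons.mp hs).1 hpi'
      simp [this, hfree pi' (List.mem_cons_of_mem _ hpi')]

-- B's inner loop over one minterm's pis: effect on a single key's set.
lemma tpB_inner_getD (ps : List String) (m : Int) (occ : PySem.Dict String (List Int)) (pi : String) :
    (ps.foldl (fun occ p => occ.modify p PySem.Set.empty (fun s => PySem.Set.add s m)) occ).getD pi PySem.Set.empty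
      = if pi ∈ ps then PySem.Set.add (occ.getD pi PySem.Set.empty) m else occ.getD pi PySem.Set.empty := by
  induction ps generalizing occ with
  | nil => simp
  | cons p ps ih =>
    simp only [List.foldl_cons, ih, PySem.Dict.getD_modify, List.mem_cons]
    by_cases hp : pi = p
    · subst hp
      by_cases hm : pi ∈ ps
      · simp [hm]
      · simp [hm]
    · by_cases hm : pi ∈ ps <;> simp [hp, hm]

-- B's whole loop: the set finally bound to pi, as a fold over the table rows.
lemma tpB_getD (l : List (Int × List String)) (occ : PySem.Dict String (List Int)) (pi : String) :
    (l.foldl (fun occ mp =>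
        mp.2.foldl (fun occ p => occ.modify p PySem.Set.empty (fun s => PySem.Set.add s mp.1)) occ) occ).getD pi PySem.Set.empty
      = l.foldl (fun s mp => if pi ∈ mp.2 then PySem.Set.add s mp.1 else s) (occ.getD pi PySem.Set.empty) := by
  induction l generalizing occ with
  | nil => rfl
  | cons mp l ih => simp only [List.foldl_cons, ih, tpB_inner_getD]

-- that fold is the fold of Set.add over the first components of the matching rows
lemma tpFold_filter (l : List (Int × List String)) (pi : String) (s : PySem.Set Int) :
    l.foldl (fun s mp => if pi ∈ mp.2 then PySem.Set.add s mp.1 else s) s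
      = ((l.filter (fun mp => mp.2.contains pi)).map (fun mp => mp.1)).foldl PySem.Set.add s := by
  induction l generalizing s with
  | nil => rfl
  | cons mp l ih =>
    by_cases h : pi ∈ mp.2
    · simp only [List.foldl_cons, List.filter_cons, if_pos h, List.contains_iff_mem.mpr h,
        if_pos, List.map_cons]
      exact ih _
    · have : mp.2.contains pi = false := by simpa using h
      simp only [List.foldl_cons, List.filter_cons, if_neg h, this, Bool.false_eq_true]
      exact ih s

-- B's keys: every pi of every row, first occurrences in order.
lemma tpB_keys (l : List (Int × List String)) (occ : PySem.Dict String (List Int)) :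
    (l.foldl (fun occ mp =>
        mp.2.foldl (fun occ p => occ.modify p PySem.Set.empty (fun s => PySem.Set.add s mp.1)) occ) occ).keys
      = PySem.Set.update occ.keys (l.flatMap (fun mp => mp.2)) := by
  induction l generalizing occ with
  | nil => simp [PySem.Set.update]
  | cons mp l ih =>
    simp only [List.foldl_cons, ih, List.flatMap_cons, PySem.Set.update_append,
      PySem.Dict.keys_foldl_modify]

-- ===== VERDICT (by name: the statement is the Claim_ definition above) =====
theorem transposed_pi_table_spec : Claim_equal_transposed_pi_table := by
  intro pi_table _
  unfold Spec_transposed_pi_table transposed_pi_table transposed_pi_table_alt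
  rw [tpBRows_eq]
  set d : PySem.Dict Int (List String) := PySem.Dict.ofList pi_table with hd
  have hnd : d.keys.Nodup := PySem.Dict.nodup_keys_ofList pi_table
  -- the two key lists agree
  have hflat : d.values.flatMap (fun v => v) = d.items.flatMap (fun mp => mp.2) := by
    simp [PySem.Dict.values, List.flatMap_map]
  set pis : PySem.Set String := PySem.Set.ofList (d.values.flatMap (fun v => v)) with hpis
  -- A's items, via the outer-loop lemma
  rw [tpA_outer d.keys (fun pi m => (d.getD m []).contains pi) pis
        (by simp only [hpis]; exact PySem.Set.nodup_ofList _)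
        PySem.Dict.empty (by intro pi _; rfl)]
  -- B's dict
  set occB : PySem.Dict String (List Int) :=
    d.items.foldl (fun occ mp =>
      mp.2.foldl (fun occ pi =>
        occ.modify pi PySem.Set.empty (fun s => PySem.Set.add s mp.1)) occ) PySem.Dict.empty with hoccB
  have hkeysB : occB.keys = pis := by
    rw [hoccB, tpB_keys]
    simp [hpis, hflat, PySem.Set.update, ← PySem.Set.ofList_eq_foldl, PySem.Dict.empty]
  have hndB : occB.keys.Nodup := by
    rw [hkeysB, hpis]; exact PySem.Set.nodup_ofList _
  rw [PySem.Dict.items_eq_map_keys occB hndB PySem.Set.empty, hkeysB]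
  simp only [PySem.Dict.empty, List.nil_append]
  refine List.map_congr_left (fun pi _ => ?_)
  -- the two sets bound to pi agree
  have hBval : occB.getD pi PySem.Set.empty
      = ((d.items.filter (fun mp => mp.2.contains pi)).map (fun mp => mp.1)).foldl PySem.Set.add PySem.Set.empty := by
    rw [hoccB, tpB_getD, tpFold_filter]
    rfl
  have hAval : d.keys.filter (fun m => (d.getD m []).contains pi)
      = (d.items.filter (fun mp => mp.2.contains pi)).map (fun mp => mp.1) := by
    rw [PySem.Dict.keys, List.filter_map]
    refine congrArg (List.map _) (List.filter_congr (fun mp hmp => ?_))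
    have : d.getD mp.1 [] = mp.2 := PySem.Dict.getD_of_mem_items d (by simpa using hmp) hnd []
    simp [Function.comp, this]
  rw [hBval, hAval]
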